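-- pv_equiv track=rewrite | github.com/gptcompany/nautilus_dev | .backup_agents_skills/hooks/auto-alpha-debug.py | is_code_file
-- ===== SOURCE A (Python) =====
-- CODE_EXTENSIONS = [
--     # Python
--     ".py",
--     # Rust
--     ".rs",
--     # JavaScript/TypeScript
--     ".js",
--     ".ts",
--     ".jsx",
--     ".tsx",
--     ".mjs",
--     ".cjs",
--     # Go
--     ".go",
--     # C/C++
--     ".c",
--     ".h",
--     ".cpp",
--     ".hpp",
--     ".cc",
--     ".cxx",
--     # Java/Kotlin
--     ".java",
--     ".kt",
--     ".kts",
--     # Ruby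
--     ".rb",
--     # PHP
--     ".php",
--     # Swift
--     ".swift",
--     # Scala
--     ".scala",
--     # Shell scripts (with logic)
--     ".sh",
--     ".bash",
--     # SQL (stored procedures, migrations)
--     ".sql",
-- ]
--
-- CODE_DIRECTORIES = [
--     "src/",
--     "lib/",
--     "scripts/",
--     "tests/",
--     "test/",
--     "api/",
--     "backend/",
--     "frontend/",
--     "core/",
--     "pkg/",
--     "cmd/",
--     "internal/",
-- ]
--
-- def is_code_file(filepath: str) -> bool:
--     """Check if file is actual code that should trigger debugging.
--
--     FIX R1-B4: Use path separators to avoid partial directory matches.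
--     """
--     filepath_lower = filepath.lower()
--
--     # Check if file has a code extension
--     for ext in CODE_EXTENSIONS:
--         if filepath_lower.endswith(ext):
--             return True
--
--     # Check if file is in a code directory (even without recognized extension)
--     # FIX R1-B4: Use path separator to avoid "src" matching "resource"
--     for code_dir in CODE_DIRECTORIES:
--         dir_name = code_dir.rstrip("/")
--         if f"/{dir_name}/" in f"/{filepath_lower}/" or filepath_lower.startswith(f"{dir_name}/"):
--             return True
--
--     return False
-- ===== SOURCE B (Python) =====
-- CODE_EXTENSIONS = [
--     ".py", ".rs", ".js", ".ts", ".jsx", ".tsx", ".mjs", ".cjs", ".go",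
--     ".c", ".h", ".cpp", ".hpp", ".cc", ".cxx", ".java", ".kt", ".kts",
--     ".rb", ".php", ".swift", ".scala", ".sh", ".bash", ".sql",
-- ]
--
-- # Directory names with the trailing '/' already stripped, held in a set.
-- CODE_DIR_NAMES = {
--     "src", "lib", "scripts", "tests", "test", "api", "backend",
--     "frontend", "core", "pkg", "cmd", "internal",
-- }
--
--
-- def is_code_file(filepath: str) -> bool:
--     """Check if file is actual code that should trigger debugging."""
--     filepath_lower = filepath.lower()
--     if any(map(filepath_lower.endswith, CODE_EXTENSIONS)):
--         return True
--     # A path segment equal to a code-directory name (the '/'-wrapped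
--     # substring test of the original is exactly segment membership).
--     return not CODE_DIR_NAMES.isdisjoint(filepath_lower.split("/"))
-- ===== Notes on version B (the rewrite author's own statement) =====
-- stated objective: simpler
-- what changed: B replaces A's per-directory loop of slash-wrapped substring searches plus a startswith fallback by splitting the lowercased path into segments once and testing set-disjointness of the segments against a set of directory names.
import Mathlib
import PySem

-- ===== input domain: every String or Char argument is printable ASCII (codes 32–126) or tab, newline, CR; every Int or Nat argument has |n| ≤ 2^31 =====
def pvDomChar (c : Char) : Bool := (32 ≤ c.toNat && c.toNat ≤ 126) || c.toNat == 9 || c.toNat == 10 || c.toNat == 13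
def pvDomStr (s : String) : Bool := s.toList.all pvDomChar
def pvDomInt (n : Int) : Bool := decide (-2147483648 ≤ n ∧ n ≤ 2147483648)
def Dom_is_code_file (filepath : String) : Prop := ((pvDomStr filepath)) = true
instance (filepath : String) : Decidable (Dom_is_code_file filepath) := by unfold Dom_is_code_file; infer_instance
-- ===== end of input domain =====

-- B replaces A's per-directory wrapped-substring scan by one split of the path into
-- segments and a set-membership test (objective: simpler/idiomatic; same cost class).

-- ===== PORT A =====
def pvCodeExtensions : List String :=
  [".py", ".rs", ".js", ".ts", ".jsx", ".tsx", ".mjs", ".cjs", ".go",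
   ".c", ".h", ".cpp", ".hpp", ".cc", ".cxx", ".java", ".kt", ".kts",
   ".rb", ".php", ".swift", ".scala", ".sh", ".bash", ".sql"]

def pvCodeDirectories : List String :=
  ["src/", "lib/", "scripts/", "tests/", "test/", "api/", "backend/",
   "frontend/", "core/", "pkg/", "cmd/", "internal/"]

-- exact port of Python's str.rstrip("/"): drop trailing '/' characters
def pvRstripSlash (l : List Char) : List Char := (l.reverse.dropWhile (· = '/')).reverse

def is_code_file (filepath : String) : Bool :=
  let fl := PySem.Chars.lower filepath.toList
  if pvCodeExtensions.any (fun ext => PySem.Chars.endswith fl ext.toList) then true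
  else
    pvCodeDirectories.any (fun cd =>
      let dn := pvRstripSlash cd.toList
      -- f"/{dir_name}/" in f"/{filepath_lower}/"  or  filepath_lower.startswith(f"{dir_name}/")
      PySem.Chars.isIn ('/' :: (dn ++ ['/'])) ('/' :: (fl ++ ['/'])) ||
        PySem.Chars.startswith fl (dn ++ ['/']))

-- ===== PORT B =====
-- the Python set literal CODE_DIR_NAMES (distinct elements, as lists of chars)
def pvCodeDirNames : List (List Char) :=
  ["src".toList, "lib".toList, "scripts".toList, "tests".toList, "test".toList,
   "api".toList, "backend".toList, "frontend".toList, "core".toList,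
   "pkg".toList, "cmd".toList, "internal".toList]

def is_code_file_alt (filepath : String) : Bool :=
  let fl := PySem.Chars.lower filepath.toList
  -- any(map(filepath_lower.endswith, CODE_EXTENSIONS))
  pvCodeExtensions.any (fun ext => PySem.Chars.endswith fl ext.toList) ||
  -- not CODE_DIR_NAMES.isdisjoint(filepath_lower.split("/"));  split("/") ported as
  -- List.splitOn '/' (the corresponding Lean function: nonempty separator, keeps empty parts)
  !((fl.splitOn '/').all (fun seg => !(pvCodeDirNames.contains seg)))

-- ===== PRECONDITION & SPEC =====
def Spec_is_code_file (filepath : String) (out : Bool) : Prop := out = is_code_file_alt filepath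
instance (filepath : String) (out : Bool) : Decidable (Spec_is_code_file filepath out) := by unfold Spec_is_code_file; infer_instance

-- ===== CLAIM (what is proved, stated in full; the proofs are below) =====
def Claim_equal_is_code_file : Prop := ∀ (filepath : String), Dom_is_code_file filepath → Spec_is_code_file filepath (is_code_file filepath)

-- ===== LEMMAS AND PROOFS =====

-- Lists a ++ '/'::r₁ and l ++ '/'::r₂ are the same and a is slash-free: the first
-- slash of the left decomposition is at or before the marked slash of the right one.
lemma pvSlashfreeAlign (a l r₁ r₂ : List Char) (ha : '/' ∉ a)
    (h : a ++ '/' :: r₁ = l ++ '/' :: r₂) :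
    (∃ m, l = a ++ m ∧ '/' :: r₁ = m ++ '/' :: r₂) ∨ (a = l ∧ r₁ = r₂) := by
  induction a generalizing l with
  | nil =>
    cases l with
    | nil => right; simpa using h
    | cons c l' => left; exact ⟨c :: l', rfl, by simpa using h⟩
  | cons c a' ih =>
    have hc : c ≠ '/' := fun hcc => ha (hcc ▸ List.mem_cons_self)
    have ha' : '/' ∉ a' := fun hm => ha (List.mem_cons_of_mem _ hm)
    cases l with
    | nil => exact absurd (List.cons.injEq .. ▸ h).1 hc
    | cons d l' =>
      obtain ⟨hcd, h'⟩ := List.cons.inj h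
      rcases ih l' ha' h' with ⟨m, hm, he⟩ | ⟨h1, h2⟩
      · exact Or.inl ⟨m, by simp [hm, hcd], he⟩
      · exact Or.inr ⟨by simp [hcd, h1], h2⟩

lemma pvSlashfreeEq (a t r₁ r₂ : List Char) (ha : '/' ∉ a) (ht : '/' ∉ t)
    (h : a ++ '/' :: r₁ = t ++ '/' :: r₂) : a = t ∧ r₁ = r₂ := by
  rcases pvSlashfreeAlign a t r₁ r₂ ha h with ⟨m, hm, he⟩ | h2
  · cases m with
    | nil => exact ⟨by simpa using hm.symm, by simpa using he⟩
    | cons d m' =>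
      obtain ⟨hd, _⟩ := List.cons.inj he
      exact absurd (hm ▸ List.mem_append_right a (hd ▸ List.mem_cons_self)) ht
  · exact h2

lemma pvFirstSlash (s : List Char) (h : '/' ∈ s) :
    ∃ a b, s = a ++ '/' :: b ∧ '/' ∉ a := by
  induction s with
  | nil => cases h
  | cons c s' ih =>
    by_cases hc : c = '/'
    · exact ⟨[], s', by simp [hc], by simp⟩
    · rcases ih ((List.mem_cons.mp h).resolve_left fun he => hc he.symm) with ⟨a, b, hs, hna⟩
      refine ⟨c :: a, b, by simp [hs], fun hm => ?_⟩
      rcases List.mem_cons.mp hm with he | hm2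
      exacts [hc he.symm, hna hm2]

lemma pvSplitOnNoSlash (a : List Char) (ha : '/' ∉ a) : a.splitOn '/' = [a] := by
  induction a with
  | nil => rfl
  | cons c a' ih =>
    have hcne : c ≠ '/' := fun hcc => ha (hcc ▸ List.mem_cons_self)
    have hc : (c == '/') = false := beq_eq_false_iff_ne.mpr hcne
    have ih' := ih fun hm => ha (List.mem_cons_of_mem _ hm)
    simp only [List.splitOn] at ih' ⊢
    simp [List.splitOnP_cons, hc, ih']

lemma pvSplitOnAppend (a b : List Char) (ha : '/' ∉ a) :
    (a ++ '/' :: b).splitOn '/' = a :: b.splitOn '/' := by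
  induction a with
  | nil => simp [List.splitOn, List.splitOnP_cons]
  | cons c a' ih =>
    have hcne : c ≠ '/' := fun hcc => ha (hcc ▸ List.mem_cons_self)
    have hc : (c == '/') = false := beq_eq_false_iff_ne.mpr hcne
    have ih' := ih fun hm => ha (List.mem_cons_of_mem _ hm)
    simp only [List.splitOn] at ih' ⊢
    simp [List.splitOnP_cons, hc, ih']

-- the '/'-wrapped needle occurs in the '/'-wrapped path iff the token is a path segment
lemma pvWrapInfixIffSeg (t : List Char) (ht : '/' ∉ t) :
    ∀ L : List Char, ('/' :: (t ++ ['/'])) <:+: ('/' :: (L ++ ['/'])) ↔ t ∈ L.splitOn '/' := by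
  intro L
  induction hn : L.length using Nat.strong_induction_on generalizing L with
  | _ n ih =>
  by_cases hs : '/' ∈ L
  · obtain ⟨a, b, hL, hna⟩ := pvFirstSlash L hs
    subst hL
    rw [pvSplitOnAppend a b hna, List.mem_cons]
    have hblen : b.length < n := by simp at hn; omega
    constructor
    · rintro ⟨s, r, hsr⟩
      cases s with
      | nil =>
        simp only [List.nil_append, List.cons_append, List.append_assoc] at hsr
        obtain ⟨-, h'⟩ := List.cons.inj hsr
        have h'' : t ++ '/' :: r = a ++ '/' :: (b ++ ['/']) := by simpa using h'
        exact Or.inl (pvSlashfreeEq t a r _ ht hna h'').1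
      | cons c s' =>
        simp only [List.cons_append, List.append_assoc] at hsr
        obtain ⟨-, h'⟩ := List.cons.inj hsr
        have h'' : a ++ '/' :: (b ++ ['/']) = s' ++ '/' :: (t ++ '/' :: r) := by
          simpa using h'.symm
        rcases pvSlashfreeAlign a s' _ _ hna h'' with ⟨m, _, he⟩ | ⟨_, he⟩
        · refine Or.inr ((ih b.length hblen b rfl).mp ⟨m, r, ?_⟩)
          simp only [List.cons_append, List.append_assoc]
          simpa using he.symm
        · refine Or.inr ((ih b.length hblen b rfl).mp ⟨[], r, ?_⟩)
          simp [he]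
    · rintro (rfl | hmem)
      · exact ⟨[], b ++ ['/'], by simp⟩
      · obtain ⟨s, r, hsr⟩ := (ih b.length hblen b rfl).mpr hmem
        refine ⟨'/' :: a ++ s, r, ?_⟩
        have : '/' :: (a ++ '/' :: b ++ ['/']) = ('/' :: a) ++ ('/' :: (b ++ ['/'])) := by simp
        rw [this, ← hsr]; simp
  · rw [pvSplitOnNoSlash L hs, List.mem_singleton]
    constructor
    · rintro ⟨s, r, hsr⟩
      cases s with
      | nil =>
        simp only [List.nil_append, List.cons_append, List.append_assoc] at hsr
        obtain ⟨-, h'⟩ := List.cons.inj hsr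
        have h'' : t ++ '/' :: r = L ++ '/' :: [] := by simpa using h'
        exact (pvSlashfreeEq t L r [] ht hs h'').1
      | cons c s' =>
        exfalso
        simp only [List.cons_append, List.append_assoc] at hsr
        obtain ⟨-, h'⟩ := List.cons.inj hsr
        have h'' : L ++ '/' :: [] = s' ++ '/' :: (t ++ '/' :: r) := by simpa using h'.symm
        rcases pvSlashfreeAlign L s' _ _ hs h'' with ⟨m, _, he⟩ | ⟨_, he⟩
        · have := congrArg List.length he; simp at this; omega
        · simp at he
    · rintro rfl
      exact List.infix_rfl

-- A's per-directory test (substring-or-prefix) equals B's segment membership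
lemma pvTokenIff (L t : List Char) (ht : '/' ∉ t) :
    (PySem.Chars.isIn ('/' :: (t ++ ['/'])) ('/' :: (L ++ ['/'])) ||
      PySem.Chars.startswith L (t ++ ['/'])) = true ↔ t ∈ L.splitOn '/' := by
  rw [Bool.or_eq_true, PySem.Chars.isIn_iff_infix, PySem.Chars.startswith_iff]
  constructor
  · rintro (h | h)
    · exact (pvWrapInfixIffSeg t ht L).mp h
    · have hp : t ++ ['/'] <+: L ++ ['/'] := h.trans (L.prefix_append ['/'])
      exact (pvWrapInfixIffSeg t ht L).mp
        ((List.cons_prefix_cons.mpr ⟨rfl, hp⟩).isInfix)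
  · intro h
    exact Or.inl ((pvWrapInfixIffSeg t ht L).mpr h)

-- every directory name is slash-free
lemma pvNamesNoSlash : ∀ t ∈ pvCodeDirNames, '/' ∉ t := by decide

-- rstrip("/") over the directory literals yields exactly the name literals
lemma pvDirsMapRstrip :
    pvCodeDirectories.map (fun cd => pvRstripSlash cd.toList) = pvCodeDirNames := by decide

lemma pvDirEq (L : List Char) :
    (pvCodeDirNames.any fun t =>
        PySem.Chars.isIn ('/' :: (t ++ ['/'])) ('/' :: (L ++ ['/'])) ||
          PySem.Chars.startswith L (t ++ ['/']))
      = !((L.splitOn '/').all fun seg => !(pvCodeDirNames.contains seg)) := by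
  rw [Bool.eq_iff_iff, List.any_eq_true, Bool.not_eq_true', List.all_eq_false]
  constructor
  · rintro ⟨t, htm, hp⟩
    exact ⟨t, (pvTokenIff L t (pvNamesNoSlash t htm)).mp hp, by simp [htm]⟩
  · rintro ⟨seg, hseg, hsegm⟩
    have hm : seg ∈ pvCodeDirNames := by simpa using hsegm
    exact ⟨seg, hm, (pvTokenIff L seg (pvNamesNoSlash seg hm)).mpr hseg⟩

theorem pv_main (filepath : String) : is_code_file filepath = is_code_file_alt filepath := by
  unfold is_code_file is_code_file_alt
  cases hext : pvCodeExtensions.any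
      (fun ext => PySem.Chars.endswith (PySem.Chars.lower filepath.toList) ext.toList) with
  | true => simp [hext]
  | false =>
    simp only [hext, Bool.false_or, Bool.false_eq_true, if_false]
    calc pvCodeDirectories.any (fun cd =>
            let dn := pvRstripSlash cd.toList
            PySem.Chars.isIn ('/' :: (dn ++ ['/']))
                ('/' :: (PySem.Chars.lower filepath.toList ++ ['/'])) ||
              PySem.Chars.startswith (PySem.Chars.lower filepath.toList) (dn ++ ['/']))
        = (pvCodeDirectories.map (fun cd => pvRstripSlash cd.toList)).any (fun t =>
            PySem.Chars.isIn ('/' :: (t ++ ['/']))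
                ('/' :: (PySem.Chars.lower filepath.toList ++ ['/'])) ||
              PySem.Chars.startswith (PySem.Chars.lower filepath.toList) (t ++ ['/'])) := by
          rw [List.any_map]; rfl
      _ = _ := by rw [pvDirsMapRstrip, pvDirEq]

-- ===== VERDICT (by name: the statement is the Claim_ definition above) =====
theorem is_code_file_spec : Claim_equal_is_code_file := by
  intro fp _
  exact pv_main fp
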